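-- pv_equiv track=rewrite | github.com/ygtmesci/bdspro-stable | scripts/clang-tidy-summary.py | get_non_err_checks
-- ===== SOURCE A (Python) =====
-- def get_non_err_checks(conf: str) -> set[str]:
--     """
--     Returns all clang tidy checks, that are NOT considered errors (i.e. only warnings).
--
--     Note: This assumes that WarningsAsErrors starts with `*`, i.e. all warnings should be
--     turned into errors and then lists exceptions (thus the leading `-`).
--     """
--     in_warnings_as_err_list = False
--     non_err_checks = set()
--     for line in conf.split("\n"):
--         line = line.strip()
--         if "WarningsAsErrors:" in line:
--             in_warnings_as_err_list = True
--         if in_warnings_as_err_list and line == "'":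
--             # end of WarningsAsErrors
--             break
--         if line.startswith("-"):
--             line = line.lstrip("-")
--             line = line.rstrip(",")
--             non_err_checks.add(line)
--
--     return non_err_checks
-- ===== SOURCE B (Python) =====
-- def get_non_err_checks(conf: str) -> set[str]:
--     """Two-phase version: find the cutoff line first, then collect in one comprehension."""
--     lines = [l.strip() for l in conf.split("\n")]
--     cutoff = len(lines)
--     for i, line in enumerate(lines):
--         if "WarningsAsErrors:" in line:
--             for j in range(i, len(lines)):
--                 if lines[j] == "'":
--                     cutoff = j
--                     break
--             break
--     return {line.lstrip("-").rstrip(",") for line in lines[:cutoff] if line.startswith("-")}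
-- ===== Notes on version B (the rewrite author's own statement) =====
-- stated objective: alternative
-- what changed: Replaces A's single flag-driven loop with break by a two-phase decomposition: first compute the cutoff index (the first quote-only line at or after the first line containing the WarningsAsErrors marker, else the end), then collect the dash-prefixed stripped lines of the prefix in one comprehension.
import Mathlib
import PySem

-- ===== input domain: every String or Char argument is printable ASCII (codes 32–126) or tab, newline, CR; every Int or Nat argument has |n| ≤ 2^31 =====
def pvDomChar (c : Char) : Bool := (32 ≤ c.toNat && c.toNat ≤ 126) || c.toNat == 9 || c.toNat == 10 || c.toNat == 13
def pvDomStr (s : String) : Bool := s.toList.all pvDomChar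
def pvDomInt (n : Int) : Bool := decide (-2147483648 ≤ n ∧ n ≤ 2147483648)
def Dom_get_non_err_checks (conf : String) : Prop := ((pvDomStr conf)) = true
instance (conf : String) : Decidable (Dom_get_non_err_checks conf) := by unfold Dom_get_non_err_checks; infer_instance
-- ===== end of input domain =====

-- B replaces A's flag-driven single loop by a two-phase decomposition (find the cutoff line,
-- then collect over the prefix); objective: alternative, same cost.


-- shared helper: line.lstrip("-").rstrip(",") — ported by hand (exact: the stripped
-- character sets are singletons, so lstrip/rstrip are dropWhile on the ends)
-- conf.split("\n") (sep nonempty, so split? is always some)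
def gnecLines (conf : String) : List String := (PySem.Str.split? conf "\n").getD []

def gnecTransform (line : String) : String :=
  String.ofList (((line.toList.dropWhile (· == '-')).reverse.dropWhile (· == ',')).reverse)

-- ===== PORT A =====
def gnecLoop : List String → Bool → PySem.Set String → PySem.Set String
  | [], _, acc => acc
  | l :: rest, flag, acc =>
    if (flag || PySem.Str.isIn "WarningsAsErrors:" (PySem.Str.strip l))
        && (PySem.Str.strip l == "'") then acc
    else gnecLoop rest (flag || PySem.Str.isIn "WarningsAsErrors:" (PySem.Str.strip l))
      (if PySem.Str.startswith (PySem.Str.strip l) "-"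
        then PySem.Set.add acc (gnecTransform (PySem.Str.strip l)) else acc)

def get_non_err_checks (conf : String) : List String :=
  gnecLoop (gnecLines conf) false PySem.Set.empty

-- ===== PORT B =====
def gnecCutoff (lines : List String) : Nat :=
  match lines.findIdx? (fun l => PySem.Str.isIn "WarningsAsErrors:" l) with
  | none => lines.length
  | some i =>
    match (lines.drop i).findIdx? (fun l => l == "'") with
    | none => lines.length
    | some j => i + j

def get_non_err_checks_alt (conf : String) : List String :=
  let lines := (gnecLines conf).map PySem.Str.strip
  PySem.Set.ofList
    (((lines.take (gnecCutoff lines)).filter (fun l => PySem.Str.startswith l "-")).map gnecTransform)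

-- ===== PRECONDITION & SPEC =====
def Spec_get_non_err_checks (conf : String) (out : List String) : Prop := out = get_non_err_checks_alt conf
instance (conf : String) (out : List String) : Decidable (Spec_get_non_err_checks conf out) := by unfold Spec_get_non_err_checks; infer_instance

-- ===== CLAIM (what is proved, stated in full; the proofs are below) =====
def Claim_equal_get_non_err_checks : Prop := ∀ (conf : String), Dom_get_non_err_checks conf → Spec_get_non_err_checks conf (get_non_err_checks conf)

-- ===== LEMMAS AND PROOFS =====

-- helper for the proof: collection over a list of (already stripped) lines
def gnecCollect (xs : List String) : List String :=
  (xs.filter (fun l => PySem.Str.startswith l "-")).map gnecTransform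

-- index of the first "'" line, or length
def gnecIdxQ (sl : List String) : Nat :=
  (sl.findIdx? (fun l => l == "'")).getD sl.length

theorem gnecIdxQ_cons_pos (l : String) (sl : List String) (h : (l == "'") = true) :
    gnecIdxQ (l :: sl) = 0 := by
  unfold gnecIdxQ
  rw [List.findIdx?_cons, if_pos h]
  rfl

theorem gnecIdxQ_cons_neg (l : String) (sl : List String) (h : (l == "'") = false) :
    gnecIdxQ (l :: sl) = gnecIdxQ sl + 1 := by
  unfold gnecIdxQ
  rw [List.findIdx?_cons, if_neg (by simp only [h]; decide)]
  cases sl.findIdx? (fun l => l == "'") <;> simp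

theorem gnecCutoff_cons_marker (l : String) (sl : List String)
    (h : PySem.Str.isIn "WarningsAsErrors:" l = true) :
    gnecCutoff (l :: sl) = gnecIdxQ (l :: sl) := by
  unfold gnecCutoff gnecIdxQ
  rw [List.findIdx?_cons (p := fun l => PySem.Str.isIn "WarningsAsErrors:" l),
    if_pos (by simp only [h])]
  simp only [List.drop_zero]
  (cases (l :: sl).findIdx? (fun l => l == "'")); simp; simp

theorem gnecCutoff_cons_nomarker (l : String) (sl : List String)
    (h : PySem.Str.isIn "WarningsAsErrors:" l = false) :
    gnecCutoff (l :: sl) = gnecCutoff sl + 1 := by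
  unfold gnecCutoff
  rw [List.findIdx?_cons (p := fun l => PySem.Str.isIn "WarningsAsErrors:" l),
    if_neg (by simp only [h]; decide)]
  cases hm : sl.findIdx? (fun l => PySem.Str.isIn "WarningsAsErrors:" l) with
  | none => simp
  | some i =>
    simp only [Option.map_some, List.length_cons, List.drop_succ_cons]
    (cases (sl.drop i).findIdx? (fun l => l == "'")); simp; simp; omega

theorem gnecMarker_ne_quote (l : String) (h : PySem.Str.isIn "WarningsAsErrors:" l = true) :
    (l == "'") = false := by
  by_contra hq
  simp only [Bool.not_eq_false] at hq
  rw [eq_of_beq hq] at h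
  exact absurd h (by decide)

theorem gnecCollect_cons (l : String) (xs : List String) :
    gnecCollect (l :: xs) =
      (if PySem.Str.startswith l "-" then [gnecTransform l] else []) ++ gnecCollect xs := by
  unfold gnecCollect
  rw [List.filter_cons]
  cases hs : PySem.Str.startswith l "-"
  · rw [if_neg (by decide), if_neg (by decide), List.nil_append]
  · rw [if_pos rfl, if_pos rfl, List.map_cons]
    rfl

theorem gnecFoldl_if_single (c : Bool) (t : String) (acc : PySem.Set String) :
    ((if c then [t] else []).foldl PySem.Set.add acc)
      = (if c then PySem.Set.add acc t else acc) := by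
  cases c <;> rfl

theorem gnecLoop_true (ls : List String) : ∀ acc,
    gnecLoop ls true acc =
      (gnecCollect ((ls.map PySem.Str.strip).take (gnecIdxQ (ls.map PySem.Str.strip)))).foldl PySem.Set.add acc := by
  induction ls with
  | nil => intro acc; rfl
  | cons l rest ih =>
    intro acc
    rw [List.map_cons]
    by_cases hq : (PySem.Str.strip l == "'") = true
    · rw [gnecIdxQ_cons_pos _ _ hq, List.take_zero]
      simp only [gnecLoop, Bool.true_or, Bool.true_and, hq, if_true]
      rfl
    · simp only [Bool.not_eq_true] at hq
      simp only [gnecLoop, Bool.true_or, Bool.true_and, hq, Bool.false_eq_true, if_false]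
      rw [gnecIdxQ_cons_neg _ _ hq, List.take_succ_cons, gnecCollect_cons,
        List.foldl_append, gnecFoldl_if_single]
      exact ih _

theorem gnecLoop_false (ls : List String) : ∀ acc,
    gnecLoop ls false acc =
      (gnecCollect ((ls.map PySem.Str.strip).take (gnecCutoff (ls.map PySem.Str.strip)))).foldl PySem.Set.add acc := by
  induction ls with
  | nil => intro acc; rfl
  | cons l rest ih =>
    intro acc
    rw [List.map_cons]
    by_cases hm : PySem.Str.isIn "WarningsAsErrors:" (PySem.Str.strip l) = true
    · have hq := gnecMarker_ne_quote _ hm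
      rw [gnecCutoff_cons_marker _ _ hm, gnecIdxQ_cons_neg _ _ hq,
        List.take_succ_cons, gnecCollect_cons, List.foldl_append, gnecFoldl_if_single]
      simp only [gnecLoop, hm, Bool.or_true, Bool.true_and, hq, Bool.false_eq_true, if_false]
      exact gnecLoop_true _ _
    · simp only [Bool.not_eq_true] at hm
      simp only [gnecLoop, hm, Bool.or_false, Bool.false_and, Bool.false_eq_true, if_false]
      rw [gnecCutoff_cons_nomarker _ _ hm, List.take_succ_cons, gnecCollect_cons,
        List.foldl_append, gnecFoldl_if_single]
      exact ih _

-- ===== VERDICT (by name: the statement is the Claim_ definition above) =====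
theorem get_non_err_checks_spec : Claim_equal_get_non_err_checks := by
  intro conf _
  unfold Spec_get_non_err_checks get_non_err_checks get_non_err_checks_alt
  rw [gnecLoop_false]
  rfl
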